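-- pv_equiv track=rewrite | github.com/posl/comment_recommendation | script/split_gen/2_time/zh/213_C/7.py | solve
-- ===== SOURCE A (Python) =====
-- def solve(n, a):
--     min1 = a[0]
--     min2 = a[1]
--     if min1 > min2:
--         min1, min2 = min2, min1
--     for i in range(2,n):
--         if a[i] < min1:
--             min2 = min1
--             min1 = a[i]
--         elif a[i] < min2:
--             min2 = a[i]
--     for i in range(n):
--         if a[i] == min2:
--             return i + 1
-- ===== SOURCE B (Python) =====
-- def solve(n, a):
--     s = sorted(a[i] for i in range(n))
--     return a.index(s[1]) + 1
-- ===== Notes on version B (the rewrite author's own statement) =====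
-- stated objective: simpler
-- what changed: replaces the hand-rolled two-minimum tracking loop plus an index scan with sort-the-prefix then look up the first occurrence of the second-smallest value
-- outside the precondition, e.g. on solve(1, [2, 1]): A returns 1, B raises IndexError; on solve(0, [3, 1]): A returns None, B raises IndexError
import Mathlib
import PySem

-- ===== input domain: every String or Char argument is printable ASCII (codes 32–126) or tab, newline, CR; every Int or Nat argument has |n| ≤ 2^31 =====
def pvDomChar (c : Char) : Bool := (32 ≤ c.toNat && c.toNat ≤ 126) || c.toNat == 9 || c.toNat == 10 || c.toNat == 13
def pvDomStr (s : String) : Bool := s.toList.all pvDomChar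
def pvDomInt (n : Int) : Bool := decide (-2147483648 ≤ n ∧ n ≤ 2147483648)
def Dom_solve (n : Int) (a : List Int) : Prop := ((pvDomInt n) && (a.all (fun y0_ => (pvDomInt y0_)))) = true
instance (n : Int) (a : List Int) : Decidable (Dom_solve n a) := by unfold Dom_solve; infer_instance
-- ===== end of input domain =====

-- B replaces A's two-minimum tracking loop + index scan by sort-the-prefix then first-occurrence lookup (simpler, not faster).


-- ===== PORT A =====
-- loop body of A's two-minimum tracking pass
def minStep (s : Int × Int) (x : Int) : Int × Int :=
  if x < s.1 then (x, s.1) else if x < s.2 then (s.1, x) else s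

-- A's early-return search loop 'for i in range(b, e): if a[i] == v: return i + 1'
def findLoop (a : List Int) (v b e : Int) : Option Int :=
  (PySem.List.pyRange b e 1).foldl
    (fun r i =>
      match r with
      | some _ => r
      | none => if PySem.List.pyGetD a i 0 = v then some (i + 1) else none)
    none

-- a[0]/a[1]/a[i] are in range under Pre_solve, so the pyGetD default 0 is never read;
-- Python falls off the search loop only outside Pre_solve, hence the final .getD 0.
def solve (n : Int) (a : List Int) : Int :=
  let m1 := PySem.List.pyGetD a 0 0
  let m2 := PySem.List.pyGetD a 1 0
  let init := if m1 > m2 then (m2, m1) else (m1, m2)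
  let mins := (PySem.List.pyRange 2 n 1).foldl (fun s i => minStep s (PySem.List.pyGetD a i 0)) init
  (findLoop a mins.2 0 n).getD 0

-- ===== PORT B =====
-- a[i], s[1] and a.index raise only outside Pre_solve; there the port reads the defaults 0 instead.
def solve_alt (n : Int) (a : List Int) : Int :=
  let s := PySem.List.sorted ((PySem.List.pyRange 0 n 1).map (fun i => PySem.List.pyGetD a i 0)) (fun x => x) false
  let v := PySem.List.pyGetD s 1 0
  match PySem.List.index? a v with
  | some k => (k : Int) + 1
  | none => 0

-- ===== PRECONDITION & SPEC =====
-- Pre_ excludes n > len(a) (A raises IndexError) and n < 2: there A reads a[1] beyond the stated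
-- prefix a[:n], raising on len(a) < 2 and otherwise returning None or an accidental value, while B raises.
def Pre_solve (n : Int) (a : List Int) : Prop := 2 ≤ n ∧ n ≤ (a.length : Int)
instance (n : Int) (a : List Int) : Decidable (Pre_solve n a) := by unfold Pre_solve; infer_instance
def pvWitness_solve : Int × List Int := (3, [5, 2, 7])

def Spec_solve (n : Int) (a : List Int) (out : Int) : Prop := out = solve_alt n a
instance (n : Int) (a : List Int) (out : Int) : Decidable (Spec_solve n a out) := by unfold Spec_solve; infer_instance

-- ===== CLAIM (what is proved, stated in full; the proofs are below) =====
def Claim_equal_solve : Prop := ∀ (n : Int) (a : List Int), Dom_solve n a → Pre_solve n a → Spec_solve n a (solve n a)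

-- ===== LEMMAS AND PROOFS =====

-- the two-minimum fold keeps (first, second) smallest of everything seen
theorem minStep_fold_inv (ys : List Int) : ∀ (m1 m2 : Int) (rest : List Int),
    m1 ≤ m2 → (∀ y ∈ rest, m2 ≤ y) →
    ∃ rest', (m1 :: m2 :: (rest ++ ys)).Perm
        ((ys.foldl minStep (m1, m2)).1 :: (ys.foldl minStep (m1, m2)).2 :: rest')
      ∧ (ys.foldl minStep (m1, m2)).1 ≤ (ys.foldl minStep (m1, m2)).2
      ∧ ∀ y ∈ rest', (ys.foldl minStep (m1, m2)).2 ≤ y := by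
  induction ys with
  | nil =>
    intro m1 m2 rest h12 hrest
    exact ⟨rest, by simp, h12, hrest⟩
  | cons x ys ih =>
    intro m1 m2 rest h12 hrest
    simp only [List.foldl_cons]
    by_cases h1 : x < m1
    · have hstep : minStep (m1, m2) x = (x, m1) := by simp [minStep, h1]
      rw [hstep]
      obtain ⟨rest', hperm, hle, hmin⟩ := ih x m1 (m2 :: rest) (le_of_lt h1)
        (by intro y hy
            rcases List.mem_cons.1 hy with rfl | hy
            · exact h12
            · exact le_trans h12 (hrest y hy))
      refine ⟨rest', List.Perm.trans ?_ hperm, hle, hmin⟩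
      rw [List.perm_iff_count]; intro z
      simp [List.count_append, List.count_cons]
      split_ifs <;> omega
    · by_cases h2 : x < m2
      · have hstep : minStep (m1, m2) x = (m1, x) := by simp [minStep, h1, h2]
        rw [hstep]
        obtain ⟨rest', hperm, hle, hmin⟩ := ih m1 x (m2 :: rest) (by omega)
          (by intro y hy
              rcases List.mem_cons.1 hy with rfl | hy
              · exact le_of_lt h2
              · exact le_trans (le_of_lt h2) (hrest y hy))
        refine ⟨rest', List.Perm.trans ?_ hperm, hle, hmin⟩
        rw [List.perm_iff_count]; intro z
        simp [List.count_append, List.count_cons]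
        split_ifs <;> omega
      · have hstep : minStep (m1, m2) x = (m1, m2) := by simp [minStep, h1, h2]
        rw [hstep]
        obtain ⟨rest', hperm, hle, hmin⟩ := ih m1 m2 (x :: rest) h12
          (by intro y hy
              rcases List.mem_cons.1 hy with rfl | hy
              · omega
              · exact hrest y hy)
        refine ⟨rest', List.Perm.trans ?_ hperm, hle, hmin⟩
        rw [List.perm_iff_count]; intro z
        simp [List.count_append, List.count_cons]
        split_ifs <;> omega

-- once the search loop has returned, it stays returned
theorem findLoop_some_absorb (a : List Int) (v : Int) (l : List Int) (r : Int) :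
    l.foldl (fun r i =>
      match r with
      | some _ => r
      | none => if PySem.List.pyGetD a i 0 = v then some (i + 1) else none) (some r) = some r := by
  induction l <;> simp_all

-- the search loop is first-occurrence lookup
theorem findLoop_eq (a : List Int) (v : Int) (ys : List Int) : ∀ (b : Int), 0 ≤ b →
    (∀ k (hk : k < ys.length), PySem.List.pyGetD a (b + (k : Int)) 0 = ys[k]) →
    findLoop a v b (b + (ys.length : Int)) = (PySem.List.index? ys v).map (fun k => b + (k : Int) + 1) := by
  induction ys with
  | nil =>
    intro b hb _
    simp [findLoop, PySem.List.index?]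
  | cons y ys ih =>
    intro b hb hget
    have h0 : PySem.List.pyGetD a b 0 = y := by simpa using hget 0 (by simp)
    rw [findLoop, PySem.List.pyRange_one_cons (by simp only [List.length_cons]; push_cast; omega), List.foldl_cons]
    rw [h0]
    by_cases hy : y = v
    · simp only [if_pos hy]
      rw [findLoop_some_absorb]
      rw [hy, PySem.List.index?_cons_self]
      simp
    · simp only [if_neg hy]
      have hrange : b + ((y :: ys).length : Int) = (b + 1) + (ys.length : Int) := by
        simp; omega
      rw [hrange]
      have := ih (b + 1) (by omega) (by
        intro k hk
        have := hget (k + 1) (by simpa using hk)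
        simpa [add_assoc, add_comm, add_left_comm] using this)
      rw [show ((PySem.List.pyRange (b+1) (b + 1 + (ys.length : Int)) 1).foldl
        (fun r i =>
          match r with
          | some _ => r
          | none => if PySem.List.pyGetD a i 0 = v then some (i + 1) else none)
        none) = findLoop a v (b+1) (b + 1 + (ys.length : Int)) from rfl, this]
      rw [PySem.List.index?_cons_of_ne ys hy]
      cases PySem.List.index? ys v <;> simp; omega

-- ===== VERDICT (by name: the statement is the Claim_ definition above) =====
theorem solve_spec : Claim_equal_solve := by
  intro n a _ hpre
  obtain ⟨h2, hlen⟩ := hpre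
  have hxslen : ((a.take n.toNat).length : Int) = n := by
    simp; omega
  obtain ⟨x0, x1, t, hxs3⟩ : ∃ x0 x1 t, a.take n.toNat = x0 :: x1 :: t := by
    cases hx : a.take n.toNat with
    | nil => rw [hx] at hxslen; simp at hxslen; omega
    | cons x0 r =>
      cases r with
      | nil => rw [hx] at hxslen; simp at hxslen; omega
      | cons x1 t => exact ⟨x0, x1, t, rfl⟩
  have ha : a = x0 :: x1 :: (t ++ a.drop n.toNat) := by
    conv_lhs => rw [← List.take_append_drop n.toNat a]
    rw [hxs3]; simp
  have hget0 : PySem.List.pyGetD a 0 0 = x0 := by rw [ha]; simp [PySem.List.pyGetD]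
  have hget1 : PySem.List.pyGetD a 1 0 = x1 := by
    rw [ha]
    have hnn : (0 : Int) ≤ (t.length : Int) + ((a.length - n.toNat : Nat) : Int) := by positivity
    simp [PySem.List.pyGetD, PySem.List.pyGet?, PySem.List.pyIdx?, hnn]
  have hgetk : ∀ k (hk : k < (a.take n.toNat).length),
      PySem.List.pyGetD a ((0 : Int) + (k : Int)) 0 = (a.take n.toNat)[k] := by
    intro k hk
    have hkn : k < a.length := by simp at hk; omega
    rw [PySem.List.pyGetD_eq_getElem a (i := (0 : Int) + (k : Int)) 0 (by omega) (by omega)]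
    simp [List.getElem_take]
  -- both programs, with their lets unfolded
  unfold Spec_solve solve solve_alt
  simp only []
  set init : Int × Int :=
    if PySem.List.pyGetD a 0 0 > PySem.List.pyGetD a 1 0
    then (PySem.List.pyGetD a 1 0, PySem.List.pyGetD a 0 0)
    else (PySem.List.pyGetD a 0 0, PySem.List.pyGetD a 1 0) with hinit
  have h12 : init.1 ≤ init.2 := by rw [hinit]; split_ifs <;> simp <;> omega
  have hpermxs : (a.take n.toNat).Perm (init.1 :: init.2 :: t) := by
    rw [hxs3, hinit, hget0, hget1]
    split_ifs with h
    · exact List.Perm.swap x1 x0 t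
    · rfl
  -- A's tracking fold is the fold of minStep over t
  have hfoldA : (PySem.List.pyRange 2 n 1).foldl
      (fun s i => minStep s (PySem.List.pyGetD a i 0)) init = t.foldl minStep init := by
    rw [← hxslen]
    rw [PySem.List.foldl_congr_mem _ _ (fun s i => minStep s (PySem.List.pyGetD (a.take n.toNat) i 0)) init]
    · rw [PySem.List.foldl_pyRange_pyGetD' (a.take n.toNat) 0 minStep init (by omega : (0:Int) ≤ 2)]
      rw [hxs3]; rfl
    · intro acc i hi
      rw [PySem.List.mem_pyRange_one] at hi
      rw [PySem.List.pyGetD_eq_getElem a (i := i) 0 (by omega) (by simp at hi ⊢; omega),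
          PySem.List.pyGetD_eq_getElem (a.take n.toNat) (i := i) 0 (by omega) (by omega)]
      simp [List.getElem_take]
  rw [hfoldA]
  -- the invariant: the fold holds the two smallest of the prefix
  obtain ⟨rest', hperm, hle, hmin⟩ :=
    minStep_fold_inv t init.1 init.2 [] h12 (by simp)
  simp only [List.nil_append, Prod.mk.eta] at hperm hle hmin
  set p1 := (t.foldl minStep init).1
  set p2 := (t.foldl minStep init).2
  -- B sorts exactly the prefix
  have hslice : (PySem.List.pyRange 0 n 1).map (fun i => PySem.List.pyGetD a i 0) = a.take n.toNat := by
    rw [PySem.List.pyRange_one]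
    apply List.ext_getElem
    · simp; omega
    · intro k h1 h2
      simp only [List.getElem_map, List.getElem_range]
      exact hgetk k (by simpa using h2)
  have hsorted : PySem.List.sorted (a.take n.toNat) (fun x => x) false
      = p1 :: p2 :: PySem.List.sorted rest' (fun x => x) false := by
    apply PySem.List.sorted_id_eq_of_perm_of_pairwise
    · refine List.Perm.trans ?_ (List.Perm.trans hperm.symm hpermxs.symm)
      exact List.Perm.cons p1 (List.Perm.cons p2 (PySem.List.sorted_perm rest' (fun x => x) false))
    · refine List.Pairwise.cons ?_ (List.Pairwise.cons ?_ ?_)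
      · intro y hy
        rcases List.mem_cons.1 hy with rfl | hy
        · exact hle
        · exact le_trans hle (hmin y ((PySem.List.mem_sorted rest' _ _ y).1 hy))
      · intro y hy
        exact hmin y ((PySem.List.mem_sorted rest' _ _ y).1 hy)
      · exact PySem.List.sorted_pairwise rest' (fun x => x)
  rw [hslice, hsorted]
  have hv : PySem.List.pyGetD (p1 :: p2 :: PySem.List.sorted rest' (fun x => x) false) 1 0 = p2 := by
    simp [PySem.List.pyGetD]
  rw [hv]
  -- p2 occurs in the prefix
  have hp2mem : p2 ∈ a.take n.toNat :=
    hpermxs.mem_iff.2 (hperm.mem_iff.2 (by simp))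
  obtain ⟨k, hk⟩ : ∃ k, PySem.List.index? (a.take n.toNat) p2 = some k := by
    have := (PySem.List.index?_isSome_iff (a.take n.toNat) p2).2 hp2mem
    exact Option.isSome_iff_exists.1 this
  -- B's lookup over all of a finds it inside the prefix
  have hidx : PySem.List.index? a p2 = some k := by
    conv_lhs => rw [← List.take_append_drop n.toNat a]
    rw [PySem.List.index?_append_of_mem _ hp2mem, hk]
  -- A's search loop
  have hfind : findLoop a p2 0 n = some ((k : Int) + 1) := by
    have := findLoop_eq a p2 (a.take n.toNat) 0 le_rfl (fun k hk => hgetk k hk)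
    simp only [zero_add] at this
    rw [← hxslen, this, hk]
    simp
  rw [hfind, hidx]
  simp
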